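-- pv_equiv track=rewrite | github.com/volcengine/verl | atropos/environments/intern_bootcamp/internbootcamp_lib/internbootcamp/bootcamp/calyonaandspreadsheet/calyonaandspreadsheet.py | preprocess_v
-- ===== SOURCE A (Python) =====
-- def preprocess_v(table):
--     n = len(table)
--     if n == 0:
--         return []
--     m = len(table[0]) if n > 0 else 0
--     v = list(range(n))  # 初始为0-based索引的row值
--     for col in range(m):
--         column = [table[i][col] for i in range(n)]
--         climbs = []
--         current_start = 0
--         for i in range(1, n):
--             if column[i] < column[i-1]:
--                 climbs.append((current_start, i))
--                 current_start = i
--         climbs.append((current_start, n))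
--         for (l, r) in climbs:
--             for w in range(l, r):
--                 if w < n:
--                     v[w] = max(v[w], r - 1)
--     return v
-- ===== SOURCE B (Python) =====
-- def preprocess_v(table):
--     n = len(table)
--     if n == 0:
--         return []
--     m = len(table[0])
--     v = list(range(n))
--     for col in range(m):
--         runend = n - 1
--         for i in range(n - 2, -1, -1):
--             if table[i + 1][col] < table[i][col]:
--                 runend = i
--             v[i] = max(v[i], runend)
--     return v
-- ===== Notes on version B (the rewrite author's own statement) =====
-- stated objective: simpler
-- what changed: Replaces A's per-column climbs interval list and nested (l,r)-by-w fill with a single backward sweep per column that carries the current run-end index; no column copy and no interval list are built.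
import Mathlib
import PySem

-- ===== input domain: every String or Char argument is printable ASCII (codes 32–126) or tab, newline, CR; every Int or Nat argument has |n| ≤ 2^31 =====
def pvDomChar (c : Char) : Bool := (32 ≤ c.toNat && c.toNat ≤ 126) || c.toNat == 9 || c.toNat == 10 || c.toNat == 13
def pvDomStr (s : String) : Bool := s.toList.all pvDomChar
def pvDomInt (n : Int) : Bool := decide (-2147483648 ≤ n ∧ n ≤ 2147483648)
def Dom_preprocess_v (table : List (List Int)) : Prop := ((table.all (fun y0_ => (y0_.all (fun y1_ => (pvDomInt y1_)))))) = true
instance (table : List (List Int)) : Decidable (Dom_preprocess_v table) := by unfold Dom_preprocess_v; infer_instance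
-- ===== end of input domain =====

-- B replaces A's per-column climbs interval list + nested (l,r)×w fill with one backward
-- sweep per column carrying the current run-end index (objective: simpler; A also mutates
-- the fresh local list v only, so there is no observable argument mutation).

-- ===== PORT A =====
-- list indexing table[i][col] / column[i] / v[w] is in range under Pre_, so `getD` is exact there
def aClimbStep (column : List Int) (st : List (Nat × Nat) × Nat) (i : Nat) : List (Nat × Nat) × Nat :=
  if column.getD i 0 < column.getD (i - 1) 0 then (st.1 ++ [(st.2, i)], i) else st

def aFillRun (n : Nat) (v : List Int) (lr : Nat × Nat) : List Int :=
  (List.range' lr.1 (lr.2 - lr.1)).foldl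
    (fun v w => if w < n then v.set w (max (v.getD w 0) ((lr.2 : Int) - 1)) else v) v

def aCol (table : List (List Int)) (n : Nat) (v : List Int) (col : Nat) : List Int :=
  let column := (List.range n).map (fun i => (table.getD i []).getD col 0)
  let st := (List.range' 1 (n - 1)).foldl (aClimbStep column) ([], 0)
  (st.1 ++ [(st.2, n)]).foldl (aFillRun n) v

def preprocess_v (table : List (List Int)) : List Int :=
  let n := table.length
  if n = 0 then []
  else (List.range ((table.getD 0 []).length)).foldl (aCol table n)
        ((List.range n).map (fun i => Int.ofNat i))

-- ===== PORT B =====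
def bStep (table : List (List Int)) (col : Nat) (st : List Int × Nat) (i : Nat) : List Int × Nat :=
  let runend := if (table.getD (i + 1) []).getD col 0 < (table.getD i []).getD col 0 then i else st.2
  (st.1.set i (max (st.1.getD i 0) (runend : Int)), runend)

def bCol (table : List (List Int)) (n : Nat) (v : List Int) (col : Nat) : List Int :=
  ((List.range (n - 1)).reverse.foldl (bStep table col) (v, n - 1)).1

def preprocess_v_alt (table : List (List Int)) : List Int :=
  let n := table.length
  if n = 0 then []
  else (List.range ((table.getD 0 []).length)).foldl (bCol table n)
        ((List.range n).map (fun i => Int.ofNat i))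

-- ===== PRECONDITION & SPEC =====
-- Pre_ excludes exactly the ragged tables on which Python A raises IndexError
-- (some row shorter than row 0); Python B raises on the same tables.
def Pre_preprocess_v (table : List (List Int)) : Prop :=
  ∀ row ∈ table, (table.headD []).length ≤ row.length
instance (table : List (List Int)) : Decidable (Pre_preprocess_v table) := by
  unfold Pre_preprocess_v; infer_instance
def pvWitness_preprocess_v : List (List Int) := [[1, 2], [3, 0]]

def Spec_preprocess_v (table : List (List Int)) (out : List Int) : Prop := out = preprocess_v_alt table
instance (table : List (List Int)) (out : List Int) : Decidable (Spec_preprocess_v table out) := by unfold Spec_preprocess_v; infer_instance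

-- ===== CLAIM (what is proved, stated in full; the proofs are below) =====
def Claim_equal_preprocess_v : Prop := ∀ (table : List (List Int)), Dom_preprocess_v table → Pre_preprocess_v table → Spec_preprocess_v table (preprocess_v table)

-- ===== LEMMAS AND PROOFS =====

-- the cell table[i][col], as both ports read it
def tcell (table : List (List Int)) (col i : Nat) : Int := (table.getD i []).getD col 0

-- run-end index of the maximal non-decreasing run containing i, read off from the top
def reAux (cell : Nat → Int) (t : Nat) : Nat → Nat
  | 0 => t
  | k + 1 => if cell (t - k) < cell (t - (k + 1)) then t - (k + 1) else reAux cell t k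

def runEnd (cell : Nat → Int) (n i : Nat) : Nat := reAux cell (n - 1) ((n - 1) - i)

theorem runEnd_top (cell : Nat → Int) (n : Nat) : runEnd cell n (n - 1) = n - 1 := by
  simp [runEnd, reAux]

theorem runEnd_step (cell : Nat → Int) (n i : Nat) (h : i < n - 1) :
    runEnd cell n i = if cell (i + 1) < cell i then i else runEnd cell n (i + 1) := by
  have h1 : (n - 1) - i = ((n - 1) - (i + 1)) + 1 := by omega
  have h2 : (n - 1) - ((n - 1) - (i + 1)) = i + 1 := by omega
  have h3 : (n - 1) - (((n - 1) - (i + 1)) + 1) = i := by omega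
  rw [runEnd, h1, reAux, h2, h3, runEnd]

theorem runEnd_self (cell : Nat → Int) (n i : Nat) (hi : i ≤ n - 1)
    (h : i = n - 1 ∨ cell (i + 1) < cell i) : runEnd cell n i = i := by
  by_cases htop : i = n - 1
  · subst htop; exact runEnd_top cell n
  · rcases h with h | h
    · exact absurd h htop
    · rw [runEnd_step cell n i (by omega)]; simp [h]

theorem runEnd_const (cell : Nat → Int) (n : Nat) :
    ∀ d i j, j - i = d → i ≤ j → j ≤ n - 1 →
      (∀ k, i < k → k ≤ j → ¬ cell k < cell (k - 1)) →
      runEnd cell n i = runEnd cell n j := by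
  intro d
  induction d with
  | zero =>
    intro i j hd _ _ _
    obtain rfl : i = j := by omega
    rfl
  | succ d ih =>
    intro i j hd h1 h2 h3
    have hi : i < n - 1 := by omega
    have hnb : ¬ cell (i + 1) < cell i := by
      have := h3 (i + 1) (by omega) (by omega)
      simpa using this
    rw [runEnd_step cell n i hi, if_neg hnb]
    exact ih (i + 1) j (by omega) (by omega) h2 (fun k hk1 hk2 => h3 k (by omega) hk2)

theorem getD_set (l : List Int) (i j : Nat) (x : Int) :
    (l.set j x).getD i 0 = if i = j ∧ j < l.length then x else l.getD i 0 := by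
  simp only [List.getD, List.getElem?_set]
  by_cases h1 : j = i
  · subst h1
    by_cases h2 : j < l.length <;> simp [h2]
  · have h1' : ¬ i = j := fun h => h1 h.symm
    simp [h1, h1']

theorem getD_map_range (n i : Nat) (f : Nat → Int) (h : i < n) :
    ((List.range n).map f).getD i 0 = f i := by
  rw [List.getD_eq_getElem _ _ (by simpa using h)]
  simp

-- the inner fill loop of A over range(l, l+len), all indices < n, updating with constant c
theorem fillAux (n : Nat) :
    ∀ (len l : Nat) (c : Int) (v : List Int), l + len ≤ n →
      ((List.range' l len).foldl
        (fun v w => if w < n then v.set w (max (v.getD w 0) c) else v) v).length = v.length ∧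
      ∀ i, ((List.range' l len).foldl
        (fun v w => if w < n then v.set w (max (v.getD w 0) c) else v) v).getD i 0 =
        if l ≤ i ∧ i < l + len ∧ i < v.length then max (v.getD i 0) c else v.getD i 0 := by
  intro len
  induction len with
  | zero =>
    intro l c v _
    refine ⟨rfl, fun i => ?_⟩
    rw [if_neg (by omega)]
    rfl
  | succ len ih =>
    intro l c v hln
    have hguard : l < n := by omega
    have hstep : (List.range' l (len + 1)).foldl
        (fun v w => if w < n then v.set w (max (v.getD w 0) c) else v) v =
        (List.range' (l + 1) len).foldl
        (fun v w => if w < n then v.set w (max (v.getD w 0) c) else v)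
        (v.set l (max (v.getD l 0) c)) := by
      rw [List.range'_succ, List.foldl_cons, if_pos hguard]
    set v' := v.set l (max (v.getD l 0) c) with hv'
    have hlen' : v'.length = v.length := by simp [hv']
    obtain ⟨hL, hP⟩ := ih (l + 1) c v' (by omega)
    constructor
    · rw [hstep, hL, hlen']
    · intro i
      rw [hstep, hP i, hlen', hv', getD_set]
      by_cases hi1 : i = l
      · subst hi1
        rw [if_neg (by omega)]
        by_cases hi2 : i < v.length
        · rw [if_pos ⟨rfl, hi2⟩, if_pos (by omega)]
        · rw [if_neg (by simp [hi2]), if_neg (by omega)]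
      · by_cases hi3 : l + 1 ≤ i ∧ i < l + 1 + len ∧ i < v.length
        · rw [if_pos hi3, if_neg (by simp [hi1]), if_pos (by omega)]
        · rw [if_neg hi3, if_neg (by simp [hi1]), if_neg (by omega)]

-- appending one maximal run (s, r) to an already-performed fill
theorem fill_extend (table : List (List Int)) (col n s r : Nat) (hsr : s ≤ r) (hr : r ≤ n)
    (h1r : 1 ≤ r)
    (hre : ∀ i, s ≤ i → i < r → runEnd (tcell table col) n i = r - 1)
    (v w : List Int) (hwL : w.length = v.length)
    (hwP : ∀ i, w.getD i 0 = if i < s ∧ i < v.length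
      then max (v.getD i 0) ((runEnd (tcell table col) n i : Int)) else v.getD i 0) :
    (aFillRun n w (s, r)).length = v.length ∧
    ∀ i, (aFillRun n w (s, r)).getD i 0 = if i < r ∧ i < v.length
      then max (v.getD i 0) ((runEnd (tcell table col) n i : Int)) else v.getD i 0 := by
  obtain ⟨hfL, hfP⟩ := fillAux n (r - s) s ((r : Int) - 1) w (by omega)
  have hA : aFillRun n w (s, r) = (List.range' s (r - s)).foldl
      (fun v w => if w < n then v.set w (max (v.getD w 0) ((r : Int) - 1)) else v) w := rfl
  constructor
  · rw [hA, hfL, hwL]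
  · intro i
    rw [hA, hfP i, hwL]
    by_cases hc : s ≤ i ∧ i < s + (r - s) ∧ i < v.length
    · rw [if_pos hc, hwP i, if_neg (by omega), if_pos (by omega)]
      have hcast : ((runEnd (tcell table col) n i : Nat) : Int) = (r : Int) - 1 := by
        rw [hre i hc.1 (by omega)]; omega
      rw [hcast]
    · rw [if_neg hc, hwP i]
      by_cases h2 : i < s ∧ i < v.length
      · rw [if_pos h2, if_pos (by omega)]
      · rw [if_neg h2, if_neg (by omega)]

-- state of A's climbs-building fold after processing indices 1..j
def climbState (table : List (List Int)) (col n j : Nat) : List (Nat × Nat) × Nat :=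
  (List.range' 1 j).foldl (aClimbStep ((List.range n).map (fun i => tcell table col i))) ([], 0)

theorem climbState_succ (table : List (List Int)) (col n j : Nat) :
    climbState table col n (j + 1) =
      aClimbStep ((List.range n).map (fun i => tcell table col i))
        (climbState table col n j) (1 + j) := by
  unfold climbState
  rw [show List.range' 1 (j + 1) = List.range' 1 j ++ [1 + j] by
        simpa using List.range'_concat (s := 1) (n := j) (step := 1),
      List.foldl_append, List.foldl_cons, List.foldl_nil]

theorem aclimbs (table : List (List Int)) (col n : Nat) :
    ∀ j, j ≤ n - 1 → 1 ≤ n →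
      (climbState table col n j).2 ≤ j ∧
      (∀ k, (climbState table col n j).2 < k → k ≤ j →
        ¬ tcell table col k < tcell table col (k - 1)) ∧
      (∀ v : List Int,
        ((climbState table col n j).1.foldl (aFillRun n) v).length = v.length ∧
        ∀ i, ((climbState table col n j).1.foldl (aFillRun n) v).getD i 0 =
          if i < (climbState table col n j).2 ∧ i < v.length
          then max (v.getD i 0) ((runEnd (tcell table col) n i : Int)) else v.getD i 0) := by
  intro j
  induction j with
  | zero =>
    intro _ _
    have h0 : climbState table col n 0 = ([], 0) := rfl
    simp only [h0]
    refine ⟨le_refl _, fun k hk1 hk2 => by omega, fun v => ⟨rfl, fun i => ?_⟩⟩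
    rw [if_neg (by omega)]
    rfl
  | succ j ih =>
    intro hj hn
    obtain ⟨ih1, ih2, ih3⟩ := ih (by omega) hn
    rw [climbState_succ, show 1 + j = j + 1 from by omega]
    have e1 : ((List.range n).map (fun i => tcell table col i)).getD (j + 1) 0 =
        tcell table col (j + 1) := getD_map_range n (j + 1) _ (by omega)
    have e2 : ((List.range n).map (fun i => tcell table col i)).getD ((j + 1) - 1) 0 =
        tcell table col j := by
      rw [Nat.add_sub_cancel]
      exact getD_map_range n j _ (by omega)
    by_cases hbrk : tcell table col (j + 1) < tcell table col j
    · have hstep : aClimbStep ((List.range n).map (fun i => tcell table col i))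
          (climbState table col n j) (j + 1) =
          ((climbState table col n j).1 ++ [((climbState table col n j).2, j + 1)], j + 1) := by
        unfold aClimbStep
        rw [e1, e2, if_pos hbrk]
      simp only [hstep]
      refine ⟨le_refl _, fun k hk1 hk2 => by omega, fun v => ?_⟩
      rw [List.foldl_append, List.foldl_cons, List.foldl_nil]
      obtain ⟨hwL, hwP⟩ := ih3 v
      have hre : ∀ i, (climbState table col n j).2 ≤ i → i < j + 1 →
          runEnd (tcell table col) n i = (j + 1) - 1 := by
        intro i hi1 hi2
        have hj' : runEnd (tcell table col) n j = j :=
          runEnd_self _ n j (by omega) (Or.inr hbrk)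
        have hconst : runEnd (tcell table col) n i = runEnd (tcell table col) n j :=
          runEnd_const _ n (j - i) i j (by omega) (by omega) (by omega)
            (fun k h1 h2 => ih2 k (by omega) h2)
        rw [hconst, hj']
        omega
      exact fill_extend table col n (climbState table col n j).2 (j + 1)
        (by omega) (by omega) (by omega) hre v _ hwL hwP
    · have hstep : aClimbStep ((List.range n).map (fun i => tcell table col i))
          (climbState table col n j) (j + 1) = climbState table col n j := by
        unfold aClimbStep
        rw [e1, e2, if_neg hbrk]
      simp only [hstep]
      refine ⟨by omega, fun k hk1 hk2 => ?_, ih3⟩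
      by_cases hk : k ≤ j
      · exact ih2 k hk1 hk
      · have : k = j + 1 := by omega
        subst this
        exact hbrk

-- per-column agreement: A's fill equals B's backward sweep
theorem bsweep (table : List (List Int)) (col n : Nat) :
    ∀ j, j ≤ n - 1 → ∀ v : List Int,
      (((List.range j).reverse.foldl (bStep table col) (v, runEnd (tcell table col) n j)).1).length = v.length ∧
      ∀ i, (((List.range j).reverse.foldl (bStep table col) (v, runEnd (tcell table col) n j)).1).getD i 0 =
        if i < j ∧ i < v.length then max (v.getD i 0) ((runEnd (tcell table col) n i : Int)) else v.getD i 0 := by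
  intro j
  induction j with
  | zero =>
    intro _ v
    refine ⟨rfl, fun i => ?_⟩
    rw [if_neg (by omega)]
    rfl
  | succ j ih =>
    intro hj v
    have hrev : (List.range (j + 1)).reverse = j :: (List.range j).reverse := by
      rw [List.range_succ, List.reverse_append]
      rfl
    have hstep : bStep table col (v, runEnd (tcell table col) n (j + 1)) j =
        (v.set j (max (v.getD j 0) ((runEnd (tcell table col) n j : Int))),
         runEnd (tcell table col) n j) := by
      have hre : runEnd (tcell table col) n j =
          if tcell table col (j + 1) < tcell table col j then j
          else runEnd (tcell table col) n (j + 1) := runEnd_step _ n j (by omega)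
      show ((v.set j (max (v.getD j 0)
          (((if tcell table col (j + 1) < tcell table col j then j
             else runEnd (tcell table col) n (j + 1)) : Nat) : Int))),
          (if tcell table col (j + 1) < tcell table col j then j
           else runEnd (tcell table col) n (j + 1))) = _
      rw [← hre]
    rw [hrev]
    rw [List.foldl_cons, hstep]
    set v' := v.set j (max (v.getD j 0) ((runEnd (tcell table col) n j : Int))) with hv'
    have hlen' : v'.length = v.length := by simp [hv']
    obtain ⟨hL, hP⟩ := ih (by omega) v'
    refine ⟨by rw [hL, hlen'], fun i => ?_⟩
    rw [hP i, hlen', hv', getD_set]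
    by_cases hi1 : i = j
    · subst hi1
      rw [if_neg (by omega)]
      by_cases hi2 : i < v.length
      · rw [if_pos ⟨rfl, hi2⟩, if_pos (by omega)]
      · rw [if_neg (by simp [hi2]), if_neg (by omega)]
    · by_cases hi3 : i < j ∧ i < v.length
      · rw [if_pos hi3, if_neg (by simp [hi1]), if_pos (by omega)]
      · rw [if_neg hi3, if_neg (by simp [hi1]), if_neg (by omega)]

theorem aCol_pointwise (table : List (List Int)) (col n : Nat) (hn : 1 ≤ n) (v : List Int) :
    (aCol table n v col).length = v.length ∧
    ∀ i, (aCol table n v col).getD i 0 =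
      if i < n ∧ i < v.length then max (v.getD i 0) ((runEnd (tcell table col) n i : Int)) else v.getD i 0 := by
  have hA : aCol table n v col =
      ((climbState table col n (n - 1)).1 ++ [((climbState table col n (n - 1)).2, n)]).foldl
        (aFillRun n) v := rfl
  obtain ⟨ih1, ih2, ih3⟩ := aclimbs table col n (n - 1) (le_refl _) hn
  obtain ⟨hwL, hwP⟩ := ih3 v
  have hre : ∀ i, (climbState table col n (n - 1)).2 ≤ i → i < n →
      runEnd (tcell table col) n i = n - 1 := by
    intro i hi1 hi2
    have hconst : runEnd (tcell table col) n i = runEnd (tcell table col) n (n - 1) :=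
      runEnd_const _ n ((n - 1) - i) i (n - 1) (by omega) (by omega) (le_refl _)
        (fun k h1 h2 => ih2 k (by omega) h2)
    rw [hconst, runEnd_top]
  rw [hA, List.foldl_append, List.foldl_cons, List.foldl_nil]
  exact fill_extend table col n (climbState table col n (n - 1)).2 n
    (by omega) (le_refl _) hn hre v _ hwL hwP

theorem bCol_pointwise (table : List (List Int)) (col n : Nat) (_hn : 1 ≤ n) (v : List Int) :
    (bCol table n v col).length = v.length ∧
    ∀ i, (bCol table n v col).getD i 0 =
      if i < n - 1 ∧ i < v.length then max (v.getD i 0) ((runEnd (tcell table col) n i : Int)) else v.getD i 0 := by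
  have hinit : (v, n - 1) = (v, runEnd (tcell table col) n (n - 1)) := by
    rw [runEnd_top]
  unfold bCol
  rw [hinit]
  exact bsweep table col n (n - 1) (le_refl _) v

theorem aCol_eq_bCol (table : List (List Int)) (col n : Nat) (hn : 1 ≤ n) (v : List Int)
    (hv : v.length = n) (hlast : ((n - 1 : Nat) : Int) ≤ v.getD (n - 1) 0) :
    aCol table n v col = bCol table n v col := by
  obtain ⟨haL, haP⟩ := aCol_pointwise table col n hn v
  obtain ⟨hbL, hbP⟩ := bCol_pointwise table col n hn v
  apply List.ext_getElem (by rw [haL, hbL])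
  intro i h1 h2
  have hiv : i < v.length := by omega
  rw [← List.getD_eq_getElem _ 0 h1, ← List.getD_eq_getElem _ 0 h2, haP i, hbP i]
  by_cases hi : i < n - 1
  · have hin : i < n := by omega
    rw [if_pos ⟨hin, hiv⟩, if_pos ⟨hi, hiv⟩]
  · have hin : i < n := by rw [haL, hv] at h1; exact h1
    have : i = n - 1 := by omega
    subst this
    rw [if_pos ⟨hin, hiv⟩, if_neg (by omega)]
    rw [runEnd_top]
    exact max_eq_left hlast

theorem outer_fold (table : List (List Int)) (n : Nat) (hn : 1 ≤ n) :
    ∀ (cols : List Nat) (v : List Int), v.length = n → ((n - 1 : Nat) : Int) ≤ v.getD (n - 1) 0 →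
      cols.foldl (aCol table n) v = cols.foldl (bCol table n) v := by
  intro cols
  induction cols with
  | nil => intro v _ _; rfl
  | cons c cs ih =>
    intro v hv hlast
    obtain ⟨hbL, hbP⟩ := bCol_pointwise table c n hn v
    rw [List.foldl_cons, List.foldl_cons, aCol_eq_bCol table c n hn v hv hlast]
    apply ih
    · rw [hbL, hv]
    · rw [hbP (n - 1), if_neg (by omega)]
      exact hlast

theorem preprocess_v_agree : ∀ table, preprocess_v table = preprocess_v_alt table := by
  intro table
  unfold preprocess_v preprocess_v_alt
  by_cases h : table.length = 0
  · simp [h]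
  · simp only [h]
    apply outer_fold table table.length (by omega)
    · simp
    · rw [getD_map_range _ _ _ (by omega)]
      simp

-- ===== VERDICT (by name: the statement is the Claim_ definition above) =====
theorem preprocess_v_spec : Claim_equal_preprocess_v := by
  intro table _ _
  unfold Spec_preprocess_v
  exact preprocess_v_agree table
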